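-- pv_equiv track=rewrite | github.com/ISARICResearch/ARC | tests/test_arc.py | is_valid_redcap_field_options
-- ===== SOURCE A (Python) =====
-- def is_valid_redcap_field_options(s: str) -> bool:
--     if not s or not isinstance(s, str):
--         return False
--
--     options = s.split("|")
--
--     for option in options:
--         option = option.strip()
--
--         # Must contain at least one comma
--         if option.count(",") < 1:
--             return False
--
--         code, label = option.split(",", 1)
--         code = code.strip()
--         label = label.strip()
--
--         # Code must be non-empty
--         if not code:
--             return False
--
--         # Label must be non-empty
--         if not label:
--             return False
--
--     return True
-- ===== SOURCE B (Python) =====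
-- def is_valid_redcap_field_options(s: str) -> bool:
--     # Single left-to-right pass: per segment, track (seen first comma,
--     # non-space char before it, non-space char after it); no split/strip/count.
--     if not s or not isinstance(s, str):
--         return False
--
--     has_comma = code_ok = label_ok = False
--     for ch in s:
--         if ch == "|":
--             if not (has_comma and code_ok and label_ok):
--                 return False
--             has_comma = code_ok = label_ok = False
--         elif ch == ",":
--             if has_comma:
--                 label_ok = True
--             else:
--                 has_comma = True
--         elif not ch.isspace():
--             if has_comma:
--                 label_ok = True
--             else:
--                 code_ok = True
--     return has_comma and code_ok and label_ok
-- ===== Notes on version B (the rewrite author's own statement) =====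
-- stated objective: alternative
-- what changed: Replaced the split on the option separator plus per-option strip/count/maxsplit-resplit/strip checks by a single left-to-right character scan that carries three flags per segment (first delimiter seen, non-whitespace before it, non-whitespace after it), with no splitting or stripping at all.
import Mathlib
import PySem

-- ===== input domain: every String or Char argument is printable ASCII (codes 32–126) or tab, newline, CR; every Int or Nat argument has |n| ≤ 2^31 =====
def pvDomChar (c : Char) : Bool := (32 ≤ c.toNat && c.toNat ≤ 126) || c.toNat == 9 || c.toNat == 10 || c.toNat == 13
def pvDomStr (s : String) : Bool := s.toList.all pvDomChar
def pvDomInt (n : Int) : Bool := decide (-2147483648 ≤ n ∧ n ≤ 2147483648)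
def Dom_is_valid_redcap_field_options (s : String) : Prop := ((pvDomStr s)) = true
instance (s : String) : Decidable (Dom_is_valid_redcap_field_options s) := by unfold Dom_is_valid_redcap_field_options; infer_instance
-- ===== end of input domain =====

-- B replaces A's separator-split plus per-option strip/count/resplit checks by a single
-- left-to-right character scan carrying three per-segment flags (objective: alternative).

-- ===== PORT A =====
-- per-option body of A's for-loop (strip, comma count, split(',',1), strip both parts)
def aCheck (option : String) : Bool :=
  let option := PySem.Str.strip option
  if PySem.Str.count option "," < 1 then false
  else
    -- 'code, label = option.split(",", 1)': after count ≥ 1 the split has exactly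
    -- two pieces, so the 2-tuple unpack is read off by position (defaults unreachable)
    let parts := (PySem.Str.splitMax? option "," 1).getD []
    let code := PySem.Str.strip (parts.getD 0 "")
    let label := PySem.Str.strip (parts.getD 1 "")
    if code = "" then false
    else if label = "" then false
    else true

def aLoop : List String → Bool
  | [] => true
  | o :: rest => if aCheck o then aLoop rest else false

def is_valid_redcap_field_options (s : String) : Bool :=
  if s = "" then false
  else
    -- s.split("|") always succeeds (separator non-empty), hence the [] default is unreachable
    aLoop ((PySem.Str.split? s "|").getD [])

-- ===== PORT B =====
-- B's scan: state (has_comma, code_ok, label_ok), reset at each '|'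
def bLoop : List Char → Bool × Bool × Bool → Bool
  | [], (hc, co, lo) => hc && co && lo
  | c :: rest, (hc, co, lo) =>
    if c = '|' then
      if !(hc && co && lo) then false else bLoop rest (false, false, false)
    else if c = ',' then
      if hc then bLoop rest (hc, co, true) else bLoop rest (true, co, lo)
    else if PySem.Chars.isspace c then bLoop rest (hc, co, lo)
    else if hc then bLoop rest (hc, co, true) else bLoop rest (hc, true, lo)

def is_valid_redcap_field_options_alt (s : String) : Bool :=
  if s = "" then false
  else bLoop s.toList (false, false, false)

-- ===== PRECONDITION & SPEC =====
def Spec_is_valid_redcap_field_options (s : String) (out : Bool) : Prop := out = is_valid_redcap_field_options_alt s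
instance (s : String) (out : Bool) : Decidable (Spec_is_valid_redcap_field_options s out) := by unfold Spec_is_valid_redcap_field_options; infer_instance

-- ===== CLAIM (what is proved, stated in full; the proofs are below) =====
def Claim_equal_is_valid_redcap_field_options : Prop := ∀ (s : String), Dom_is_valid_redcap_field_options s → Spec_is_valid_redcap_field_options s (is_valid_redcap_field_options s)

-- ===== LEMMAS AND PROOFS =====

-- B's per-character transition, as a fold step (bLoop's non-'|' branches)
def pvStep (st : Bool × Bool × Bool) (c : Char) : Bool × Bool × Bool :=
  match st with
  | (hc, co, lo) =>
    if c = ',' then (if hc then (hc, co, true) else (true, co, lo))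
    else if PySem.Chars.isspace c then (hc, co, lo)
    else if hc then (hc, co, true) else (hc, true, lo)

def pvOk (st : Bool × Bool × Bool) : Bool := st.1 && st.2.1 && st.2.2

-- reference split on '|' (accumulator form matching splitOn.go)
def pvSplit : List Char → List Char → List (List Char)
  | pre, [] => [pre]
  | pre, c :: rest => if c = '|' then pre :: pvSplit [] rest else pvSplit (pre ++ [c]) rest

theorem pvSplitOn_go_eq (l : List Char) : ∀ (fuel : ℕ) (cur : List Char) (acc : List (List Char)),
    l.length ≤ fuel →
    PySem.Chars.splitOn.go ['|'] fuel l cur acc = acc.reverse ++ pvSplit cur.reverse l := by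
  induction l with
  | nil =>
    intro fuel cur acc _
    cases fuel <;> · rw [PySem.Chars.splitOn.go.eq_def]; simp [pvSplit]
  | cons c rest ih =>
    intro fuel cur acc h
    cases fuel with
    | zero => simp at h
    | succ f =>
      rw [PySem.Chars.splitOn.go.eq_def]
      by_cases hc : c = '|'
      · subst hc
        have hp : List.isPrefixOf ['|'] ('|' :: rest) = true := by
          simp [List.isPrefixOf]
        simp only [hp, if_true, List.length_singleton, List.drop_succ_cons, List.drop_zero]
        rw [ih f [] (cur.reverse :: acc) (Nat.le_of_succ_le_succ (by simpa using h))]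
        simp [pvSplit]
      · have hp : List.isPrefixOf ['|'] (c :: rest) = false := by
          simp [List.isPrefixOf]
          exact fun e => hc e.symm
        simp only [hp, Bool.false_eq_true, if_false]
        rw [ih f (c :: cur) acc (Nat.le_of_succ_le_succ (by simpa using h))]
        simp [pvSplit, hc]

theorem pvSplit?_eq (cs : List Char) :
    PySem.Chars.split? cs ['|'] = some (pvSplit [] cs) := by
  have h := pvSplitOn_go_eq cs (cs.length + 1) [] [] (by omega)
  simp [PySem.Chars.split?, PySem.Chars.splitOn, h]

theorem pvCount_go_eq (l : List Char) : ∀ (fuel acc : ℕ), l.length ≤ fuel →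
    PySem.Chars.count.go [','] fuel l acc = acc + l.count ',' := by
  induction l with
  | nil =>
    intro fuel acc _
    cases fuel <;> · rw [PySem.Chars.count.go.eq_def]; simp
  | cons c rest ih =>
    intro fuel acc h
    cases fuel with
    | zero => simp at h
    | succ f =>
      rw [PySem.Chars.count.go.eq_def]
      by_cases hc : c = ','
      · subst hc
        have hp : List.isPrefixOf [','] (',' :: rest) = true := by
          simp [List.isPrefixOf]
        simp only [hp, if_true, List.length_singleton, List.drop_succ_cons, List.drop_zero]
        rw [ih f (acc + 1) (Nat.le_of_succ_le_succ (by simpa using h))]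
        simp
        omega
      · have hp : List.isPrefixOf [','] (c :: rest) = false := by
          simp [List.isPrefixOf]
          exact fun e => hc e.symm
        simp only [hp, Bool.false_eq_true, if_false]
        rw [ih f acc (Nat.le_of_succ_le_succ (by simpa using h))]
        simp [hc]

theorem pvCount_comma (cs : List Char) : PySem.Chars.count cs [','] = cs.count ',' := by
  have h := pvCount_go_eq cs cs.length 0 (le_refl _)
  simp [PySem.Chars.count, h]

theorem pvSplitOnMax_go_zero (fuel : ℕ) (l cur : List Char) (acc : List (List Char)) :
    PySem.Chars.splitOnMax.go [','] fuel 0 l cur acc = ((cur.reverse ++ l) :: acc).reverse := by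
  rw [PySem.Chars.splitOnMax.go.eq_def]
  cases fuel <;> cases l <;> simp

theorem pvSplitOnMax_go_one (pre : List Char) : ∀ (fuel : ℕ) (post cur : List Char) (acc : List (List Char)),
    (pre ++ ',' :: post).length ≤ fuel → ',' ∉ pre →
    PySem.Chars.splitOnMax.go [','] fuel 1 (pre ++ ',' :: post) cur acc
      = acc.reverse ++ [cur.reverse ++ pre, post] := by
  induction pre with
  | nil =>
    intro fuel post cur acc h _
    cases fuel with
    | zero => simp at h
    | succ f =>
      rw [List.nil_append, PySem.Chars.splitOnMax.go.eq_def]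
      have hp : List.isPrefixOf [','] (',' :: post) = true := by
        simp [List.isPrefixOf]
      simp [hp, pvSplitOnMax_go_zero]
  | cons p pre' ih =>
    intro fuel post cur acc h hnp
    have hpc : p ≠ ',' := fun e => hnp (by simp [e])
    have hnp' : ',' ∉ pre' := fun e => hnp (by simp [e])
    cases fuel with
    | zero => simp at h
    | succ f =>
      rw [List.cons_append, PySem.Chars.splitOnMax.go.eq_def]
      have hp : List.isPrefixOf [','] (p :: (pre' ++ ',' :: post)) = false := by
        simp [List.isPrefixOf]
        exact fun e => hpc e.symm
      simp only [hp, Bool.false_eq_true, if_false, if_neg (by omega : ¬ (1 : Nat) = 0)]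
      rw [ih f post (p :: cur) acc (Nat.le_of_succ_le_succ (by simpa using h)) hnp']
      simp

theorem pvSplitOnMax_comma (pre post : List Char) (h : ',' ∉ pre) :
    PySem.Chars.splitOnMax (pre ++ ',' :: post) [','] 1 = [pre, post] := by
  have hg := pvSplitOnMax_go_one pre ((pre ++ ',' :: post).length + 1) post [] []
    (by omega) h
  simp only [PySem.Chars.splitOnMax]
  norm_num
  simpa using hg

theorem pvDropWhile_forall {α : Type} (p : α → Bool) (l : List α) :
    (∀ x ∈ List.dropWhile p l, p x = true) ↔ (∀ x ∈ l, p x = true) := by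
  induction l with
  | nil => simp
  | cons a l ih =>
    by_cases h : p a = true <;> simp [h, ih]

theorem pvMem_dropWhile_iff {α : Type} (p : α → Bool) (l : List α) (a : α) (h : p a = false) :
    a ∈ List.dropWhile p l ↔ a ∈ l := by
  induction l with
  | nil => simp
  | cons c l ih =>
    by_cases hc : p c = true
    · have hne : a ≠ c := by
        intro e
        rw [e, hc] at h
        exact Bool.noConfusion h
      simp [hc, ih, hne]
    · simp [hc]

theorem pvRstrip_eq_nil_iff (cs : List Char) :
    PySem.Chars.rstrip cs = [] ↔ ∀ x ∈ cs, PySem.Chars.isspace x = true := by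
  simp [PySem.Chars.rstrip, List.dropWhile_eq_nil_iff]

theorem pvStrip_eq_nil_iff (cs : List Char) :
    PySem.Chars.strip cs = [] ↔ ∀ x ∈ cs, PySem.Chars.isspace x = true := by
  rw [PySem.Chars.strip, pvRstrip_eq_nil_iff]
  rw [PySem.Chars.lstrip]
  exact pvDropWhile_forall _ _

theorem pvMem_strip_comma (cs : List Char) : ',' ∈ PySem.Chars.strip cs ↔ ',' ∈ cs := by
  have hsp : PySem.Chars.isspace ',' = false := by decide
  rw [PySem.Chars.strip, PySem.Chars.rstrip, PySem.Chars.lstrip]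
  rw [List.mem_reverse, pvMem_dropWhile_iff _ _ _ hsp, List.mem_reverse,
    pvMem_dropWhile_iff _ _ _ hsp]

theorem pvDropWhile_append_comma (a b : List Char) :
    List.dropWhile PySem.Chars.isspace (a ++ ',' :: b)
      = List.dropWhile PySem.Chars.isspace a ++ ',' :: b := by
  rw [List.dropWhile_append]
  split_ifs with h
  · rw [List.isEmpty_iff] at h
    rw [h]
    simp [(by decide : PySem.Chars.isspace ',' = false)]
  · rfl

theorem pvStrip_append_comma (pre post : List Char) :
    PySem.Chars.strip (pre ++ ',' :: post)
      = PySem.Chars.lstrip pre ++ ',' :: PySem.Chars.rstrip post := by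
  have h1 : PySem.Chars.lstrip (pre ++ ',' :: post) = PySem.Chars.lstrip pre ++ ',' :: post := by
    rw [PySem.Chars.lstrip, PySem.Chars.lstrip]
    exact pvDropWhile_append_comma pre post
  rw [PySem.Chars.strip, h1, PySem.Chars.rstrip]
  rw [show (PySem.Chars.lstrip pre ++ ',' :: post).reverse
      = post.reverse ++ ',' :: (PySem.Chars.lstrip pre).reverse by simp]
  rw [pvDropWhile_append_comma]
  simp [PySem.Chars.rstrip]

theorem pvExists_first_comma (cs : List Char) (h : ',' ∈ cs) :
    ∃ pre post, cs = pre ++ ',' :: post ∧ ',' ∉ pre := by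
  induction cs with
  | nil => simp at h
  | cons c cs' ih =>
    by_cases hc : c = ','
    · exact ⟨[], cs', by simp [hc], by simp⟩
    · have h' : ',' ∈ cs' := by
        rcases List.mem_cons.mp h with h1 | h1
        · exact absurd h1.symm hc
        · exact h1
      obtain ⟨p, q, he, hn⟩ := ih h'
      refine ⟨c :: p, q, by simp [he], ?_⟩
      intro hx
      rcases List.mem_cons.mp hx with h1 | h1
      · exact hc h1.symm
      · exact hn h1

theorem pvFoldl_no_comma (l : List Char) (h : ',' ∉ l) (co lo : Bool) :
    List.foldl pvStep (false, co, lo) l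
      = (false, co || l.any (fun c => !PySem.Chars.isspace c), lo) := by
  induction l generalizing co with
  | nil => simp
  | cons c l ih =>
    have hc : c ≠ ',' := fun e => h (by simp [e])
    have hl : ',' ∉ l := fun e => h (by simp [e])
    by_cases hsp : PySem.Chars.isspace c = true
    · simp [pvStep, hc, hsp, ih hl]
    · simp [pvStep, hc, hsp, ih hl]

theorem pvFoldl_after_comma (l : List Char) (co lo : Bool) :
    List.foldl pvStep (true, co, lo) l
      = (true, co, lo || l.any (fun c => !PySem.Chars.isspace c)) := by
  induction l generalizing lo with
  | nil => simp
  | cons c l ih =>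
    by_cases hc : c = ','
    · subst hc
      simp [pvStep, ih, (by decide : PySem.Chars.isspace ',' = false)]
    · by_cases hsp : PySem.Chars.isspace c = true
      · simp [pvStep, hc, hsp, ih]
      · simp [pvStep, hc, hsp, ih]

theorem pvOfList_eq_empty_iff (l : List Char) : String.ofList l = "" ↔ l = [] := by
  constructor
  · intro h
    have := congrArg String.toList h
    simpa using this
  · intro h
    rw [h]

set_option maxHeartbeats 1000000 in
theorem pvSeg_eq (cs : List Char) :
    aCheck (String.ofList cs) = pvOk (List.foldl pvStep (false, false, false) cs) := by
  have hts : (PySem.Str.strip (String.ofList cs)).toList = PySem.Chars.strip cs := by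
    simp [PySem.Str.toList_strip]
  have hcomma : ("," : String).toList = [','] := rfl
  have hcount : PySem.Str.count (PySem.Str.strip (String.ofList cs)) ","
      = (PySem.Chars.strip cs).count ',' := by
    rw [PySem.Str.count_eq, hts, hcomma, pvCount_comma]
  by_cases hm : ',' ∈ cs
  · obtain ⟨pre, post, rfl, hnp⟩ := pvExists_first_comma cs hm
    have hmem : ',' ∈ PySem.Chars.strip (pre ++ ',' :: post) :=
      (pvMem_strip_comma _).mpr (by simp)
    have hcpos : 0 < (PySem.Chars.strip (pre ++ ',' :: post)).count ',' :=
      List.count_pos_iff.mpr hmem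
    have hnp2 : ',' ∉ PySem.Chars.lstrip pre := by
      intro hx
      exact hnp ((List.dropWhile_sublist _).mem hx)
    have hsm : PySem.Chars.splitMax? (PySem.Chars.strip (pre ++ ',' :: post)) [','] 1
        = some [PySem.Chars.lstrip pre, PySem.Chars.rstrip post] := by
      rw [pvStrip_append_comma]
      simp only [PySem.Chars.splitMax?]
      rw [pvSplitOnMax_comma _ _ hnp2]
      simp
    have hsm' : (PySem.Str.splitMax? (PySem.Str.strip (String.ofList (pre ++ ',' :: post))) "," 1).getD []
        = [String.ofList (PySem.Chars.lstrip pre), String.ofList (PySem.Chars.rstrip post)] := by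
      rw [PySem.Str.splitMax?.eq_1, hts, hcomma, hsm]
      rfl
    have hcode : PySem.Str.strip (String.ofList (PySem.Chars.lstrip pre)) = "" ↔
        (∀ x ∈ pre, PySem.Chars.isspace x = true) := by
      rw [PySem.Str.strip.eq_1, pvOfList_eq_empty_iff]
      simp only [String.toList_ofList]
      rw [pvStrip_eq_nil_iff]
      rw [PySem.Chars.lstrip]
      exact pvDropWhile_forall _ _
    have hlabel : PySem.Str.strip (String.ofList (PySem.Chars.rstrip post)) = "" ↔
        (∀ x ∈ post, PySem.Chars.isspace x = true) := by
      rw [PySem.Str.strip.eq_1, pvOfList_eq_empty_iff]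
      simp only [String.toList_ofList]
      rw [pvStrip_eq_nil_iff]
      rw [PySem.Chars.rstrip]
      constructor
      · intro hh x hx
        exact (pvDropWhile_forall PySem.Chars.isspace post.reverse).mp
          (fun y hy => hh y (List.mem_reverse.mpr hy)) x (List.mem_reverse.mpr hx)
      · intro hh x hx
        have hx1 : x ∈ List.dropWhile PySem.Chars.isspace post.reverse := List.mem_reverse.mp hx
        have hx2 : x ∈ post := List.mem_reverse.mp ((List.dropWhile_sublist _).mem hx1)
        exact hh x hx2
    have hR : List.foldl pvStep (false, false, false) (pre ++ ',' :: post)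
        = (true, pre.any (fun c => !PySem.Chars.isspace c),
           post.any (fun c => !PySem.Chars.isspace c)) := by
      rw [List.foldl_append, pvFoldl_no_comma pre hnp, List.foldl_cons]
      have hstep : pvStep (false, false || pre.any (fun c => !PySem.Chars.isspace c), false) ','
          = (true, pre.any (fun c => !PySem.Chars.isspace c), false) := by
        simp [pvStep]
      rw [hstep, pvFoldl_after_comma]
      simp
    show (if PySem.Str.count (PySem.Str.strip (String.ofList (pre ++ ',' :: post))) "," < 1 then false
      else
        if PySem.Str.strip (((PySem.Str.splitMax? (PySem.Str.strip (String.ofList (pre ++ ',' :: post))) "," 1).getD []).getD 0 "") = "" then false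
        else if PySem.Str.strip (((PySem.Str.splitMax? (PySem.Str.strip (String.ofList (pre ++ ',' :: post))) "," 1).getD []).getD 1 "") = "" then false
        else true) = _
    rw [if_neg (by rw [hcount]; omega)]
    rw [hsm']
    rw [List.getD_cons_zero, List.getD_cons_succ, List.getD_cons_zero]
    rw [hR]
    by_cases hpre : ∀ x ∈ pre, PySem.Chars.isspace x = true
    · have ha : pre.any (fun c => !PySem.Chars.isspace c) = false := by
        simp only [List.any_eq_false]
        intro x hx
        simp [hpre x hx]
      rw [if_pos (hcode.mpr hpre)]
      simp [pvOk, ha]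
    · have ha : pre.any (fun c => !PySem.Chars.isspace c) = true := by
        cases hq : pre.any (fun c => !PySem.Chars.isspace c) with
        | false => exact absurd (fun x hx => by simpa using List.any_eq_false.mp hq x hx) hpre
        | true => rfl
      rw [if_neg (fun hh => hpre (hcode.mp hh))]
      by_cases hpost : ∀ x ∈ post, PySem.Chars.isspace x = true
      · have hb : post.any (fun c => !PySem.Chars.isspace c) = false := by
          simp only [List.any_eq_false]
          intro x hx
          simp [hpost x hx]
        rw [if_pos (hlabel.mpr hpost)]
        simp [pvOk, hb]
      · have hb : post.any (fun c => !PySem.Chars.isspace c) = true := by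
          cases hq : post.any (fun c => !PySem.Chars.isspace c) with
          | false => exact absurd (fun x hx => by simpa using List.any_eq_false.mp hq x hx) hpost
          | true => rfl
        rw [if_neg (fun hh => hpost (hlabel.mp hh))]
        simp [pvOk, ha, hb]
  · have hnm : ',' ∉ PySem.Chars.strip cs := fun hx => hm ((pvMem_strip_comma cs).mp hx)
    have h0 : (PySem.Chars.strip cs).count ',' = 0 := List.count_eq_zero.mpr hnm
    show (if PySem.Str.count (PySem.Str.strip (String.ofList cs)) "," < 1 then false
      else
        if PySem.Str.strip (((PySem.Str.splitMax? (PySem.Str.strip (String.ofList cs)) "," 1).getD []).getD 0 "") = "" then false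
        else if PySem.Str.strip (((PySem.Str.splitMax? (PySem.Str.strip (String.ofList cs)) "," 1).getD []).getD 1 "") = "" then false
        else true) = _
    rw [if_pos (by rw [hcount, h0]; omega)]
    rw [pvFoldl_no_comma cs hm]
    simp [pvOk]

theorem pvAll_congr {α : Type} (f g : α → Bool) (l : List α) (h : ∀ x, f x = g x) :
    l.all f = l.all g := by
  induction l with
  | nil => rfl
  | cons a l ih => simp [h, ih]

theorem pvALoop_eq_all (opts : List String) : aLoop opts = opts.all aCheck := by
  induction opts with
  | nil => rfl
  | cons o rest ih =>
    cases h : aCheck o <;> simp [aLoop, h, ih]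

theorem pvBLoop_cons (c : Char) (rest : List Char) (st : Bool × Bool × Bool) (h : c ≠ '|') :
    bLoop (c :: rest) st = bLoop rest (pvStep st c) := by
  obtain ⟨hc, co, lo⟩ := st
  simp only [bLoop, pvStep, if_neg h]
  split_ifs <;> rfl

theorem pvBLoop_eq (l : List Char) : ∀ (cur : List Char),
    bLoop l (List.foldl pvStep (false, false, false) cur)
      = (pvSplit cur l).all (fun seg => pvOk (List.foldl pvStep (false, false, false) seg)) := by
  induction l with
  | nil =>
    intro cur
    rcases hst : List.foldl pvStep (false, false, false) cur with ⟨a, b, d⟩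
    simp [bLoop, pvSplit, pvOk, hst]
  | cons c rest ih =>
    intro cur
    by_cases hc : c = '|'
    · subst hc
      rcases hst : List.foldl pvStep (false, false, false) cur with ⟨a, b, d⟩
      have hr := ih []
      simp only [List.foldl_nil] at hr
      cases a <;> cases b <;> cases d <;> simp [bLoop, pvOk, pvSplit, hr, hst]
    · rw [pvBLoop_cons c rest _ hc]
      have hfold : pvStep (List.foldl pvStep (false, false, false) cur) c
          = List.foldl pvStep (false, false, false) (cur ++ [c]) := by
        simp
      rw [hfold, ih (cur ++ [c])]
      simp [pvSplit, hc]

-- ===== VERDICT (by name: the statement is the Claim_ definition above) =====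
set_option maxHeartbeats 1000000 in
theorem is_valid_redcap_field_options_spec : Claim_equal_is_valid_redcap_field_options := by
  intro s _
  unfold Spec_is_valid_redcap_field_options
  unfold is_valid_redcap_field_options is_valid_redcap_field_options_alt
  by_cases hs : s = ""
  · simp [hs]
  · simp only [if_neg hs]
    have hbar : ("|" : String).toList = ['|'] := rfl
    have hsplit : (PySem.Str.split? s "|").getD [] = (pvSplit [] s.toList).map String.ofList := by
      rw [PySem.Str.split?.eq_1, hbar, pvSplit?_eq]
      rfl
    rw [hsplit]
    have hb := pvBLoop_eq s.toList []
    simp only [List.foldl_nil] at hb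
    rw [hb, pvALoop_eq_all, List.all_map]
    exact pvAll_congr _ _ _ (fun seg => by
      simp only [Function.comp_apply]
      exact pvSeg_eq seg)
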